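-- pv_equiv track=rewrite | github.com/PabloChamorroTebar/WEB-TFG | PracticasUpm/operations.py | create_grupos
-- ===== SOURCE A (Python) =====
-- def create_grupos(json_grupos):
--     grupos = {}
--     for json_grupo in json_grupos:
--         if grupos.get(json_grupo['grupo'].replace("'", "")) is None:
--             grupos[json_grupo['grupo'].replace("'", "")] = [json_grupo['nombre']]
--         else:
--             grupos[json_grupo['grupo'].replace("'", "")].append(json_grupo['nombre'])
--     return grupos
-- ===== SOURCE B (Python) =====
-- def create_grupos(json_grupos):
--     # Dedupe cleaned keys in first-occurrence order, then collect each group's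
--     # names with one comprehension per key (dict build replaced by dedup+filter).
--     key = lambda g: g['grupo'].replace("'", "")
--     keys = list(dict.fromkeys(key(g) for g in json_grupos))
--     return {k: [g['nombre'] for g in json_grupos if key(g) == k] for k in keys}
-- ===== Notes on version B (the rewrite author's own statement) =====
-- stated objective: alternative
-- what changed: Replaces the incremental dict-of-lists accumulation with a two-phase pass: dedupe the cleaned keys in first-occurrence order via dict.fromkeys, then build each group's name list with a filter comprehension per key.
import Mathlib
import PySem

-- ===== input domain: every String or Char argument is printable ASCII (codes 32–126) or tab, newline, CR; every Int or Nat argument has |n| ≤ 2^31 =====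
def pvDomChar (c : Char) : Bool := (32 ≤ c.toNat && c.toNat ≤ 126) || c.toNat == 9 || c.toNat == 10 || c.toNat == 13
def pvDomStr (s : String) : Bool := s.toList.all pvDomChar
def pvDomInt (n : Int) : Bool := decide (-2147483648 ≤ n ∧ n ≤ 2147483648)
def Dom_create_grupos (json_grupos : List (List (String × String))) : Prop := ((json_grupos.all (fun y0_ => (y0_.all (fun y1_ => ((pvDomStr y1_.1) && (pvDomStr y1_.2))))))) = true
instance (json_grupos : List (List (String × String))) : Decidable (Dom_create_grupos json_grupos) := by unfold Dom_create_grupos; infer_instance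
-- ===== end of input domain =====

-- B replaces A's incremental dict-of-lists build by dedup of cleaned keys + one filter pass per key (alternative decomposition, not faster).

-- ===== PORT A =====
-- shared field access: json_grupo['grupo'].replace("'", "") and json_grupo['nombre'] (total under Pre_)
def pvKey (g : List (String × String)) : String :=
  PySem.Str.replace ((PySem.Dict.get? (PySem.Dict.mk g) "grupo").getD "") "'" ""

def pvNombre (g : List (String × String)) : String :=
  (PySem.Dict.get? (PySem.Dict.mk g) "nombre").getD ""

def create_grupos (json_grupos : List (List (String × String))) : List (String × List String) :=
  (json_grupos.foldl
    (fun (grupos : PySem.Dict String (List String)) jg =>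
      match grupos.get? (pvKey jg) with
      | none => grupos.insert (pvKey jg) [pvNombre jg]
      | some v => grupos.insert (pvKey jg) (v ++ [pvNombre jg]))
    PySem.Dict.empty).items

-- ===== PORT B =====
def create_grupos_alt (json_grupos : List (List (String × String))) : List (String × List String) :=
  let keys := PySem.List.dedup (json_grupos.map pvKey)
  keys.map (fun k => (k, (json_grupos.filter (fun g => pvKey g == k)).map pvNombre))

-- ===== PRECONDITION & SPEC =====
-- Pre_: every element dict has the keys 'grupo' and 'nombre' (Python A raises KeyError otherwise)
def Pre_create_grupos (json_grupos : List (List (String × String))) : Prop :=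
  (json_grupos.all (fun g => (PySem.Dict.mk g).contains "grupo" && (PySem.Dict.mk g).contains "nombre")) = true
instance (json_grupos : List (List (String × String))) : Decidable (Pre_create_grupos json_grupos) := by unfold Pre_create_grupos; infer_instance

def pvWitness_create_grupos : (List (List (String × String))) :=
  [[("grupo", "a'"), ("nombre", "x")], [("grupo", "a"), ("nombre", "y")], [("grupo", "b"), ("nombre", "z")]]

def Spec_create_grupos (json_grupos : List (List (String × String))) (out : List (String × List String)) : Prop := out = create_grupos_alt json_grupos
instance (json_grupos : List (List (String × String))) (out : List (String × List String)) : Decidable (Spec_create_grupos json_grupos out) := by unfold Spec_create_grupos; infer_instance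

-- ===== CLAIM (what is proved, stated in full; the proofs are below) =====
def Claim_equal_create_grupos : Prop := ∀ (json_grupos : List (List (String × String))), Dom_create_grupos json_grupos → Pre_create_grupos json_grupos → Spec_create_grupos json_grupos (create_grupos json_grupos)

-- ===== LEMMAS AND PROOFS =====

-- A's loop body is exactly dict.modify with default [] and append
lemma stepA_eq_modify (d : PySem.Dict String (List String)) (jg : List (String × String)) :
    (match d.get? (pvKey jg) with
      | none => d.insert (pvKey jg) [pvNombre jg]
      | some v => d.insert (pvKey jg) (v ++ [pvNombre jg]))
    = d.modify (pvKey jg) [] (· ++ [pvNombre jg]) := by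
  cases h : d.get? (pvKey jg) with
  | none => simp [PySem.Dict.modify, PySem.Dict.getD_eq_get?_getD, h]
  | some v => simp [PySem.Dict.modify, PySem.Dict.getD_eq_get?_getD, h]

-- A's fold is the modify-fold over the (key, name) pairs
lemma foldA_eq_foldl_modify (l : List (List (String × String))) (d : PySem.Dict String (List String)) :
    l.foldl
      (fun (grupos : PySem.Dict String (List String)) jg =>
        match grupos.get? (pvKey jg) with
        | none => grupos.insert (pvKey jg) [pvNombre jg]
        | some v => grupos.insert (pvKey jg) (v ++ [pvNombre jg])) d
    = (l.map (fun g => (pvKey g, pvNombre g))).foldl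
        (fun (d : PySem.Dict String (List String)) p => d.modify p.1 [] (· ++ [p.2])) d := by
  induction l generalizing d with
  | nil => rfl
  | cons g t ih => simp only [List.foldl_cons, List.map_cons, stepA_eq_modify, List.foldl_map]

-- ===== VERDICT (by name: the statement is the Claim_ definition above) =====
theorem create_grupos_spec : Claim_equal_create_grupos := by
  intro l _ _
  unfold Spec_create_grupos create_grupos_alt create_grupos
  rw [foldA_eq_foldl_modify]
  have hnd : ((l.map (fun g => (pvKey g, pvNombre g))).foldl
      (fun (d : PySem.Dict String (List String)) p => d.modify p.1 [] (· ++ [p.2]))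
      PySem.Dict.empty).keys.Nodup :=
    PySem.Dict.nodup_keys_foldl_modify_key (l.map (fun g => (pvKey g, pvNombre g)))
      (fun p : String × String => p.1) [] (fun _ p => (· ++ [p.2]))
      PySem.Dict.empty PySem.Dict.nodup_keys_empty
  rw [PySem.Dict.items_eq_map_keys _ hnd []]
  have hkeys : ((l.map (fun g => (pvKey g, pvNombre g))).foldl
      (fun (d : PySem.Dict String (List String)) p => d.modify p.1 [] (· ++ [p.2]))
      PySem.Dict.empty).keys = PySem.List.dedup (l.map pvKey) := by
    rw [PySem.Dict.keys_foldl_modify_key]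
    simp [PySem.Set.update_nil_left, List.map_map, Function.comp_def]
  rw [hkeys]
  apply List.map_congr_left
  intro k _
  rw [PySem.Dict.getD_foldl_modify_append]
  simp [List.filter_map, List.map_map, Function.comp_def]
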